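-- pv_equiv track=rewrite | github.com/markroland/dotstar-sequences | sequences.py | spectrum_straight_across_with_rotation
-- ===== SOURCE A (Python) =====
-- import math
--
-- def rotate_list(my_list, position):
--     return my_list[position:] + my_list[:position]
--
-- def spectrum_straight_across_with_rotation(number_of_leds, revolutions, offset, spectrum_colors):
--
--     # Initialization. Fill an array of length "number_of_leds" with zeros
--     strip_colors = [0] * number_of_leds
--
--     # Fill dots object with values from "spectrum".
--     # "dots" can't be assigned directly because it's a "dostar" object, not an array
--     # strip_colors = rotate_list(strip_colors, offset)
--     for i in range(number_of_leds):
--         if i < number_of_leds/2: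
--             index = (offset + i) % len(spectrum_colors)
--         else:
--             index = (offset + (number_of_leds - i)) % len(spectrum_colors)
--         strip_colors[i] = spectrum_colors[index]
--
--     # Rotate starting point once every revolution
--     strip_colors = rotate_list(strip_colors, revolutions % math.floor(number_of_leds/2))
--
--     return strip_colors
-- ===== SOURCE B (Python) =====
-- def spectrum_straight_across_with_rotation(number_of_leds, revolutions, offset, spectrum_colors):
--     # Single pass: fold the post-hoc list rotation into the index arithmetic.
--     r = revolutions % (number_of_leds // 2)
--     result = []
--     for i in range(number_of_leds):
--         j = (i + r) % number_of_leds
--         dist = j if j < number_of_leds / 2 else number_of_leds - j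
--         result.append(spectrum_colors[(offset + dist) % len(spectrum_colors)])
--     return result
-- ===== Notes on version B (the rewrite author's own statement) =====
-- stated objective: simpler
-- what changed: B replaces A's build-then-rotate (preallocate a zero list, fill it by index in a loop, then rotate it with two slices) by a single list-building pass that folds the rotation into the modular index arithmetic, with no intermediate list, no in-place assignment and no rotate_list helper.
import Mathlib
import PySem

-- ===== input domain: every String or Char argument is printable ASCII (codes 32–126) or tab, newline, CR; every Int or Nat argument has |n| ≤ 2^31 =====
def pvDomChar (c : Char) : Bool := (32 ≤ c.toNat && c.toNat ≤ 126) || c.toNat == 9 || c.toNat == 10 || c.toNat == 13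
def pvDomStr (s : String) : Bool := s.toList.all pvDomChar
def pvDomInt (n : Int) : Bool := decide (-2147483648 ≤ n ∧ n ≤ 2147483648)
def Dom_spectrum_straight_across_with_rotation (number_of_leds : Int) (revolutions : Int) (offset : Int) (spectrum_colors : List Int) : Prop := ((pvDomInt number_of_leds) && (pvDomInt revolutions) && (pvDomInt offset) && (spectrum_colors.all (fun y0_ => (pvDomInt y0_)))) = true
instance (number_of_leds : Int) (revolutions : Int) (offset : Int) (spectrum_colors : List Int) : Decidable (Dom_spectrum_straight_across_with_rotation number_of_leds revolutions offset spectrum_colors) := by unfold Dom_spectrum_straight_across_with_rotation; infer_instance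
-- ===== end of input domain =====

-- B replaces A's build-then-rotate (fill a preallocated list, then rotate it by slicing)
-- with a single direct pass whose index arithmetic folds the rotation in (objective: simpler).

-- ===== PORT A =====
-- rotate_list(my_list, position) = my_list[position:] + my_list[:position]
def rotate_list (my_list : List Int) (position : Int) : List Int :=
  PySem.List.slice my_list (some position) none ++ PySem.List.slice my_list none (some position)

-- Notes on exactness: 'i < number_of_leds/2' is a float comparison of ints, exact as
-- '2*i < number_of_leds' for |n| ≤ 2^31; 'math.floor(number_of_leds/2)' is exact as
-- 'PySem.Int.floordiv number_of_leds 2' on the same range; 'strip_colors[i] = …' uses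
-- pySetD (i is always in range 0..n-1 = the list's length); 'spectrum_colors[index]'
-- uses pyGetD (Pre_ excludes the empty spectrum, where Python raises ZeroDivisionError
-- on '% 0'; Pre_ also excludes n ∈ {0,1}, where 'revolutions % 0' raises).
def spectrum_straight_across_with_rotation (number_of_leds : Int) (revolutions : Int) (offset : Int) (spectrum_colors : List Int) : List Int :=
  let strip_colors : List Int := List.replicate number_of_leds.toNat 0
  let strip_colors :=
    (PySem.List.pyRange 0 number_of_leds 1).foldl (fun s i =>
      let index :=
        if 2 * i < number_of_leds then
          PySem.Int.mod (offset + i) spectrum_colors.length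
        else
          PySem.Int.mod (offset + (number_of_leds - i)) spectrum_colors.length
      PySem.List.pySetD s i (PySem.List.pyGetD spectrum_colors index 0)) strip_colors
  rotate_list strip_colors (PySem.Int.mod revolutions (PySem.Int.floordiv number_of_leds 2))

-- ===== PORT B =====
-- One pass: r computed up front, rotation folded into the modular index.
def spectrum_straight_across_with_rotation_alt (number_of_leds : Int) (revolutions : Int) (offset : Int) (spectrum_colors : List Int) : List Int :=
  let r := PySem.Int.mod revolutions (PySem.Int.floordiv number_of_leds 2)
  (PySem.List.pyRange 0 number_of_leds 1).map (fun i =>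
    let j := PySem.Int.mod (i + r) number_of_leds
    let dist := if 2 * j < number_of_leds then j else number_of_leds - j
    PySem.List.pyGetD spectrum_colors (PySem.Int.mod (offset + dist) spectrum_colors.length) 0)

-- ===== PRECONDITION & SPEC =====
-- Pre_ excludes exactly the inputs where the Python A raises: number_of_leds ∈ {0,1}
-- (ZeroDivisionError in 'revolutions % math.floor(number_of_leds/2)') and
-- number_of_leds ≥ 2 with an empty spectrum_colors (ZeroDivisionError in '% len(...)').
def Pre_spectrum_straight_across_with_rotation (number_of_leds : Int) (revolutions : Int) (offset : Int) (spectrum_colors : List Int) : Prop :=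
  number_of_leds < 0 ∨ (2 ≤ number_of_leds ∧ spectrum_colors ≠ [])
instance (number_of_leds : Int) (revolutions : Int) (offset : Int) (spectrum_colors : List Int) : Decidable (Pre_spectrum_straight_across_with_rotation number_of_leds revolutions offset spectrum_colors) := by unfold Pre_spectrum_straight_across_with_rotation; infer_instance

def pvWitness_spectrum_straight_across_with_rotation : Int × Int × Int × List Int := (6, 7, 1, [10, 20, 30, 40])

def Spec_spectrum_straight_across_with_rotation (number_of_leds : Int) (revolutions : Int) (offset : Int) (spectrum_colors : List Int) (out : List Int) : Prop := out = spectrum_straight_across_with_rotation_alt number_of_leds revolutions offset spectrum_colors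
instance (number_of_leds : Int) (revolutions : Int) (offset : Int) (spectrum_colors : List Int) (out : List Int) : Decidable (Spec_spectrum_straight_across_with_rotation number_of_leds revolutions offset spectrum_colors out) := by unfold Spec_spectrum_straight_across_with_rotation; infer_instance

-- ===== CLAIM (what is proved, stated in full; the proofs are below) =====
def Claim_equal_spectrum_straight_across_with_rotation : Prop := ∀ (number_of_leds : Int) (revolutions : Int) (offset : Int) (spectrum_colors : List Int), Dom_spectrum_straight_across_with_rotation number_of_leds revolutions offset spectrum_colors → Pre_spectrum_straight_across_with_rotation number_of_leds revolutions offset spectrum_colors → Spec_spectrum_straight_across_with_rotation number_of_leds revolutions offset spectrum_colors (spectrum_straight_across_with_rotation number_of_leds revolutions offset spectrum_colors)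

-- ===== LEMMAS AND PROOFS =====

-- A's fill loop over a length-m zero list builds the list of its per-index values.
theorem pv_foldl_fill (f : Int → Int) (m : Nat) :
    ∀ (s : List Int), m ≤ s.length →
      (PySem.List.pyRange 0 (m : Int) 1).foldl (fun s i => PySem.List.pySetD s i (f i)) s
        = (List.range m).map (fun k : Nat => f (k : Int)) ++ s.drop m := by
  induction m with
  | zero => intro s _; simp
  | succ m ih =>
    intro s hs
    have h1 : ((m : Int) + 1) = ((m + 1 : Nat) : Int) := by push_cast; ring
    have h2 : PySem.List.pyRange 0 ((m + 1 : Nat) : Int) 1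
        = PySem.List.pyRange 0 (m : Int) 1 ++ [(m : Int)] := by
      rw [← h1, PySem.List.pyRange_one_succ_right (by positivity)]
    rw [h2, List.foldl_append, ih s (by omega)]
    simp only [List.foldl_cons, List.foldl_nil, PySem.List.pySetD_natCast]
    have hm : m < s.length := by omega
    have hdrop : s.drop m = s[m] :: s.drop (m + 1) := (List.drop_eq_getElem_cons hm)
    rw [hdrop, List.range_succ, List.map_append]
    rw [List.set_append_right _ _ (by simp)]
    rw [List.length_map, List.length_range, Nat.sub_self]
    simp
    conv_lhs => rw [hdrop]
    rfl


-- rotating the mapped range by r (0 ≤ r < m) = mapping over the shifted, wrapped indices.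
theorem pv_rotate_map (g : Int → Int) (m : Nat) (r : Int) (hr0 : 0 ≤ r) (hrm : r < (m : Int)) :
    PySem.List.slice ((List.range m).map (fun k : Nat => g (k : Int))) (some r) none
      ++ PySem.List.slice ((List.range m).map (fun k : Nat => g (k : Int))) none (some r)
      = (List.range m).map (fun k : Nat => g (PySem.Int.mod ((k : Int) + r) (m : Int))) := by
  rw [PySem.List.slice_from _ hr0, PySem.List.slice_to _ hr0]
  set t := r.toNat with ht
  have hrt : r = (t : Int) := by omega
  have htm : t < m := by omega
  have hmodpos : (0 : Int) < (m : Int) := by exact_mod_cast (by omega : 0 < m)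
  apply List.ext_getElem
  · simp; omega
  · intro idx hidx hidx'
    have hidxm : idx < m := by simpa using hidx'
    by_cases hcase : idx < m - t
    · rw [List.getElem_append_left (by simp; omega)]
      simp only [List.getElem_drop, List.getElem_map, List.getElem_range]
      have hv : PySem.Int.mod ((idx : Int) + r) (m : Int) = ((t + idx : Nat) : Int) := by
        rw [PySem.Int.mod_eq_emod_of_pos hmodpos, hrt]
        have h3 : ((idx : Int) + (t : Int)) = ((t + idx : Nat) : Int) := by push_cast; ring
        rw [h3, Int.emod_eq_of_lt (by positivity) (by exact_mod_cast by omega)]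
      rw [hv]
    · rw [List.getElem_append_right (by simp; omega)]
      simp only [List.getElem_take, List.getElem_map, List.getElem_range, List.length_drop,
        List.length_map, List.length_range]
      have hv : PySem.Int.mod ((idx : Int) + r) (m : Int) = ((idx - (m - t) : Nat) : Int) := by
        rw [PySem.Int.mod_eq_emod_of_pos hmodpos, hrt]
        have hsplit : (idx : Int) + (t : Int)
            = ((idx - (m - t) : Nat) : Int) + (m : Int) * 1 := by omega
        rw [hsplit, Int.add_mul_emod_self_left,
          Int.emod_eq_of_lt (by positivity) (by exact_mod_cast by omega)]
      rw [hv]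

-- ===== VERDICT (by name: the statement is the Claim_ definition above) =====
theorem spectrum_straight_across_with_rotation_spec : Claim_equal_spectrum_straight_across_with_rotation := by
  intro n rev off sc _ hpre
  unfold Spec_spectrum_straight_across_with_rotation
  unfold spectrum_straight_across_with_rotation spectrum_straight_across_with_rotation_alt
  dsimp only
  rcases hpre with hneg | ⟨hn2, hsc⟩
  · rw [PySem.List.pyRange_one_eq_nil (by omega)]
    have h0 : n.toNat = 0 := by omega
    simp [h0, rotate_list, PySem.List.slice]
  · set m := n.toNat with hm
    have hnm : n = (m : Int) := by omega
    have hfd : (0 : Int) < PySem.Int.floordiv n 2 := by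
      rw [PySem.Int.floordiv_eq_ediv_of_pos (by omega)]; omega
    set r := PySem.Int.mod rev (PySem.Int.floordiv n 2) with hrdef
    have hr0 : 0 ≤ r := PySem.Int.mod_nonneg _ hfd
    have hrn : r < (m : Int) := by
      have h1 := PySem.Int.mod_lt rev hfd
      have h2 : PySem.Int.floordiv n 2 ≤ n := by
        rw [PySem.Int.floordiv_eq_ediv_of_pos (by omega)]; omega
      omega
    set f : Int → Int := fun i =>
      PySem.List.pyGetD sc
        (if 2 * i < n then PySem.Int.mod (off + i) sc.length
         else PySem.Int.mod (off + (n - i)) sc.length) 0 with hf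
    have hrange : PySem.List.pyRange 0 n 1 = PySem.List.pyRange 0 (m : Int) 1 := by rw [← hnm]
    have hfold :
        (PySem.List.pyRange 0 n 1).foldl (fun s i =>
          let index :=
            if 2 * i < n then PySem.Int.mod (off + i) sc.length
            else PySem.Int.mod (off + (n - i)) sc.length
          PySem.List.pySetD s i (PySem.List.pyGetD sc index 0))
          (List.replicate n.toNat (0 : Int))
          = (List.range m).map (fun k : Nat => f (k : Int)) := by
      rw [hrange]
      have := pv_foldl_fill f m (List.replicate m (0 : Int)) (by simp)
      simpa [hf] using this
    rw [hfold]
    unfold rotate_list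
    rw [pv_rotate_map f m r hr0 hrn]
    conv_rhs => rw [hrange, PySem.List.pyRange_one]
    rw [List.map_map]
    apply List.map_congr_left
    intro k _
    simp only [Function.comp, hf, Int.zero_add, hnm]
    split_ifs <;> rfl
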